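-- pv_equiv track=rewrite | github.com/Noettore/AdventOfCode | 2020/solutions/day_16.py | find_invalid_field
-- ===== SOURCE A (Python) =====
-- def check_field(rule: tuple, field: int) -> bool:
--     """check if a field is valid given a rule"""
--     for min_range, max_range in rule:
--         if  min_range <= field <= max_range:
--             return True
--     return False
--
-- def find_invalid_field(rules: dict, ticket: list) -> int:
--     """check if a ticket is valid or not"""
--     for field in ticket:
--         valid = False
--         for rule in rules.values():
--             valid = check_field(rule, field)
--             if valid:
--                 break
--         if not valid:
--             return field
--     return None
-- ===== SOURCE B (Python) =====
-- def find_invalid_field(rules: dict, ticket: list) -> int: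
--     """check if a ticket is valid or not"""
--     # merge all rule intervals once, then binary-search each field
--     ivs = sorted((iv for rule in rules.values() for iv in rule), key=lambda iv: iv[0])
--     merged = []
--     for lo, hi in ivs:
--         if merged and lo <= merged[-1][1]:
--             if hi > merged[-1][1]:
--                 merged[-1] = (merged[-1][0], hi)
--         else:
--             merged.append((lo, hi))
--     los = [iv[0] for iv in merged]
--     n = len(los)
--     for field in ticket:
--         lo_i, hi_i = 0, n
--         while lo_i < hi_i:
--             mid = (lo_i + hi_i) // 2
--             if los[mid] <= field:
--                 lo_i = mid + 1
--             else:
--                 hi_i = mid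
--         if lo_i == 0 or field > merged[lo_i - 1][1]:
--             return field
--     return None
-- ===== Notes on version B (the rewrite author's own statement) =====
-- stated objective: alternative
-- what changed: Instead of scanning every range of every rule for each ticket field, B flattens and sorts all rule intervals once, merges them into a disjoint sorted list, and decides each field's validity with a hand-written binary search over the merged intervals.
import Mathlib
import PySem

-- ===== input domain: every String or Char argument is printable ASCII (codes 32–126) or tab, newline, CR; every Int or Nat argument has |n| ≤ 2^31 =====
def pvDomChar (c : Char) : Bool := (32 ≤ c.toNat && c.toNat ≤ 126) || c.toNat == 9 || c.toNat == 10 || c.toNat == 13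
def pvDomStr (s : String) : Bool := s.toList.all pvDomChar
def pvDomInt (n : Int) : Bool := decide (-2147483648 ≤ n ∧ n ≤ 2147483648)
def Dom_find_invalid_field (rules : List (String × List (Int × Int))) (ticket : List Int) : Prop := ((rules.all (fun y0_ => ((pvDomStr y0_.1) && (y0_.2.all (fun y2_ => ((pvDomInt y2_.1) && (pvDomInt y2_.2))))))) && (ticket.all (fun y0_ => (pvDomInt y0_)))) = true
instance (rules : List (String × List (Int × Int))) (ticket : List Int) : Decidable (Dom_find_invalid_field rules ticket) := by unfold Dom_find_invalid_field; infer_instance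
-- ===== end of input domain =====

-- B merges all rule intervals once (sort by lower bound, sweep) and binary-searches
-- each ticket field in the merged, disjoint intervals, instead of scanning the ranges
-- of every rule for every field (objective: alternative algorithm, same result).

-- ===== PORT A =====
def check_field : List (Int × Int) → Int → Bool
  | [], _ => false
  | (min_range, max_range) :: rest, field =>
      if min_range ≤ field ∧ field ≤ max_range then true else check_field rest field

-- inner 'for rule in rules.values(): valid = check_field(rule, field); if valid: break'
def pvValidLoop : List (List (Int × Int)) → Int → Bool
  | [], _ => false
  | rule :: rest, field =>
      let valid := check_field rule field
      if valid then valid else pvValidLoop rest field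

-- outer 'for field in ticket'
def pvTicketLoopA (vals : List (List (Int × Int))) : List Int → Option Int
  | [] => none
  | field :: rest =>
      if pvValidLoop vals field then pvTicketLoopA vals rest else some field

def find_invalid_field (rules : List (String × List (Int × Int))) (ticket : List Int) : Option Int :=
  pvTicketLoopA (PySem.Dict.ofList rules).values ticket

-- ===== PORT B =====
-- the Python 'merged' list is kept head-first here (head = Python's merged[-1]) and reversed once after the loop
def pvMergeStep (merged : List (Int × Int)) (iv : Int × Int) : List (Int × Int) :=
  match merged with
  | (llo, lhi) :: tl =>
      if iv.1 ≤ lhi then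
        if lhi < iv.2 then (llo, iv.2) :: tl else (llo, lhi) :: tl
      else iv :: (llo, lhi) :: tl
  | [] => [iv]

-- the hand-written 'while lo_i < hi_i' bisection; fuel = len(los) bounds its iterations
def pvBisLoop (los : List Int) (field : Int) : Nat → Nat → Nat → Nat
  | 0, lo, _ => lo
  | fuel + 1, lo, hi =>
      if lo < hi then
        let mid := (lo + hi) / 2
        -- los[mid] is always in range here, so getD is exact
        if los.getD mid 0 ≤ field then pvBisLoop los field fuel (mid + 1) hi
        else pvBisLoop los field fuel lo mid
      else lo

def pvTicketLoopB (merged : List (Int × Int)) (los : List Int) (n : Nat) : List Int → Option Int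
  | [] => none
  | field :: rest =>
      let i := pvBisLoop los field n 0 n
      if i = 0 ∨ (merged.getD (i - 1) (0, 0)).2 < field then some field
      else pvTicketLoopB merged los n rest

def find_invalid_field_alt (rules : List (String × List (Int × Int))) (ticket : List Int) : Option Int :=
  let ivs := PySem.List.sorted (((PySem.Dict.ofList rules).values).flatMap (fun rule => rule)) (fun iv => iv.1)
  let merged := (ivs.foldl pvMergeStep []).reverse
  let los := merged.map (fun iv => iv.1)
  pvTicketLoopB merged los los.length ticket

-- ===== PRECONDITION & SPEC =====
def Spec_find_invalid_field (rules : List (String × List (Int × Int))) (ticket : List Int) (out : Option Int) : Prop := out = find_invalid_field_alt rules ticket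
instance (rules : List (String × List (Int × Int))) (ticket : List Int) (out : Option Int) : Decidable (Spec_find_invalid_field rules ticket out) := by unfold Spec_find_invalid_field; infer_instance

-- ===== CLAIM (what is proved, stated in full; the proofs are below) =====
def Claim_equal_find_invalid_field : Prop := ∀ (rules : List (String × List (Int × Int))) (ticket : List Int), Dom_find_invalid_field rules ticket → Spec_find_invalid_field rules ticket (find_invalid_field rules ticket)

-- ===== LEMMAS AND PROOFS =====

-- 'field lies in the interval iv'
def pvIn (field : Int) (iv : Int × Int) : Bool := decide (iv.1 ≤ field ∧ field ≤ iv.2)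

theorem check_field_eq_any (r : List (Int × Int)) (f : Int) : check_field r f = r.any (pvIn f) := by
  induction r with
  | nil => rfl
  | cons iv rest ih =>
      obtain ⟨mn, mx⟩ := iv
      by_cases h : mn ≤ f ∧ f ≤ mx
      · simp [check_field, pvIn, h]
      · simp [check_field, pvIn, h, ih]

theorem validLoop_eq_any (vals : List (List (Int × Int))) (f : Int) :
    pvValidLoop vals f = (vals.flatMap (fun rule => rule)).any (pvIn f) := by
  induction vals with
  | nil => rfl
  | cons r rest ih =>
      simp only [pvValidLoop, List.flatMap_cons, List.any_append, check_field_eq_any, ih]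
      cases r.any (pvIn f) <;> simp

-- the merge sweep: coverage is preserved, the accumulator stays lo-sorted (descending,
-- head-first) and gap-separated
theorem merge_master (f : Int) (xs : List (Int × Int)) : ∀ (acc : List (Int × Int)),
    xs.Pairwise (fun a b => a.1 ≤ b.1) →
    acc.Pairwise (fun a b => b.1 ≤ a.1) →
    acc.IsChain (fun a b => b.2 < a.1) →
    (∀ p ∈ acc, ∀ iv ∈ xs, p.1 ≤ iv.1) →
    ((xs.foldl pvMergeStep acc).any (pvIn f) = (acc.any (pvIn f) || xs.any (pvIn f)))
    ∧ (xs.foldl pvMergeStep acc).Pairwise (fun a b => b.1 ≤ a.1)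
    ∧ (xs.foldl pvMergeStep acc).IsChain (fun a b => b.2 < a.1) := by
  induction xs with
  | nil =>
      intro acc _ hp hch _
      simpa using ⟨hp, hch⟩
  | cons iv xs ih =>
      intro acc hxs hp hch hall
      rw [List.foldl_cons]
      obtain ⟨hiv_le, hxs'⟩ := List.pairwise_cons.mp hxs
      have key : (pvMergeStep acc iv).any (pvIn f) = (acc.any (pvIn f) || pvIn f iv)
          ∧ (pvMergeStep acc iv).Pairwise (fun a b => b.1 ≤ a.1)
          ∧ (pvMergeStep acc iv).IsChain (fun a b => b.2 < a.1)
          ∧ (∀ p ∈ pvMergeStep acc iv, ∀ jv ∈ xs, p.1 ≤ jv.1) := by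
        rcases acc with _ | ⟨⟨llo, lhi⟩, tl⟩
        · refine ⟨by simp [pvMergeStep], by simp [pvMergeStep], by simp [pvMergeStep], ?_⟩
          intro p hmem jv hjv
          simp [pvMergeStep] at hmem
          subst hmem
          exact hiv_le jv hjv
        · have hlloiv : llo ≤ iv.1 := hall (llo, lhi) List.mem_cons_self iv List.mem_cons_self
          obtain ⟨hphd, hptl⟩ := List.pairwise_cons.mp hp
          by_cases hbr : iv.1 ≤ lhi
          · by_cases hx : lhi < iv.2
            · have hstep : pvMergeStep ((llo, lhi) :: tl) iv = (llo, iv.2) :: tl := by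
                simp [pvMergeStep, hbr, hx]
              rw [hstep]
              refine ⟨?_, ?_, ?_, ?_⟩
              · simp only [List.any_cons]
                cases htl : tl.any (pvIn f)
                · simp only [Bool.or_false]
                  simp only [pvIn]
                  rw [Bool.or_comm, ← Bool.decide_or, decide_eq_decide]
                  constructor
                  · rintro ⟨h1, h2⟩
                    rcases le_or_gt f lhi with h | h
                    · exact Or.inr ⟨h1, h⟩
                    · exact Or.inl ⟨by omega, h2⟩
                  · rintro (⟨h1, h2⟩ | ⟨h1, h2⟩) <;> exact ⟨by omega, by omega⟩
                · simp
              · exact List.pairwise_cons.mpr ⟨hphd, hptl⟩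
              · rcases tl with _ | ⟨t, ts⟩
                · simp
                · have := List.isChain_cons_cons.mp hch
                  exact List.isChain_cons_cons.mpr ⟨this.1, this.2⟩
              · intro p hmem jv hjv
                rcases List.mem_cons.mp hmem with rfl | hmem
                · exact le_trans hlloiv (hiv_le jv hjv)
                · exact hall p (List.mem_cons_of_mem _ hmem) jv (List.mem_cons_of_mem _ hjv)
            · have hstep : pvMergeStep ((llo, lhi) :: tl) iv = (llo, lhi) :: tl := by
                simp [pvMergeStep, hbr, hx]
              rw [hstep]
              refine ⟨?_, hp, hch, ?_⟩
              · simp only [List.any_cons]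
                cases htl : tl.any (pvIn f)
                · simp only [Bool.or_false]
                  simp only [pvIn]
                  rw [Bool.or_comm, ← Bool.decide_or, decide_eq_decide]
                  constructor
                  · exact fun h => Or.inr h
                  · rintro (⟨h1, h2⟩ | ⟨h1, h2⟩) <;> exact ⟨by omega, by omega⟩
                · simp
              · intro p hmem jv hjv
                exact hall p hmem jv (List.mem_cons_of_mem _ hjv)
          · have hstep : pvMergeStep ((llo, lhi) :: tl) iv = iv :: (llo, lhi) :: tl := by
              simp [pvMergeStep, hbr]
            rw [hstep]
            refine ⟨?_, ?_, ?_, ?_⟩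
            · rw [List.any_cons, Bool.or_comm]
            · refine List.pairwise_cons.mpr ⟨?_, hp⟩
              intro p hmem
              exact hall p hmem iv List.mem_cons_self
            · exact List.isChain_cons_cons.mpr ⟨by simp; omega, hch⟩
            · intro p hmem jv hjv
              rcases List.mem_cons.mp hmem with rfl | hmem
              · exact hiv_le jv hjv
              · exact hall p hmem jv (List.mem_cons_of_mem _ hjv)
      obtain ⟨ha, hp', hch', hall'⟩ := key
      obtain ⟨ih1, ih2, ih3⟩ := ih (pvMergeStep acc iv) hxs' hp' hch' hall'
      refine ⟨?_, ih2, ih3⟩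
      rw [ih1, ha, List.any_cons, Bool.or_assoc]

-- the hand-written bisection computes bisect_right on a sorted list
theorem bisLoop_spec (los : List Int) (f : Int) (hs : los.Pairwise (· ≤ ·)) :
    ∀ (fuel lo hi : Nat), lo ≤ hi → hi ≤ los.length → hi - lo ≤ fuel →
    (∀ j (hj : j < los.length), j < lo → los[j] ≤ f) →
    (∀ j (hj : j < los.length), hi ≤ j → f < los[j]) →
    lo ≤ pvBisLoop los f fuel lo hi ∧ pvBisLoop los f fuel lo hi ≤ hi ∧
    (∀ j (hj : j < los.length), j < pvBisLoop los f fuel lo hi → los[j] ≤ f) ∧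
    (∀ j (hj : j < los.length), pvBisLoop los f fuel lo hi ≤ j → f < los[j]) := by
  have mono : ∀ (p q : Nat) (hpq : p ≤ q) (hq : q < los.length), los[p]'(by omega) ≤ los[q] := by
    intro p q hpq hq
    rcases Nat.lt_or_ge p q with h | h
    · exact List.pairwise_iff_getElem.mp hs p q (by omega) hq h
    · have : p = q := by omega
      subst this; rfl
  intro fuel
  induction fuel with
  | zero =>
      intro lo hi hlh hhn hf hlow hhigh
      have : lo = hi := by omega
      subst this
      exact ⟨le_refl _, le_refl _, hlow, hhigh⟩
  | succ fuel ih =>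
      intro lo hi hlh hhn hf hlow hhigh
      by_cases hlt : lo < hi
      · have hm1 : lo ≤ (lo + hi) / 2 := by omega
        have hm2 : (lo + hi) / 2 < hi := by omega
        have hmr : (lo + hi) / 2 < los.length := by omega
        have hget : los.getD ((lo + hi) / 2) 0 = los[(lo + hi) / 2] := List.getD_eq_getElem los 0 hmr
        by_cases hcmp : los.getD ((lo + hi) / 2) 0 ≤ f
        · have step : pvBisLoop los f (fuel + 1) lo hi = pvBisLoop los f fuel ((lo + hi) / 2 + 1) hi := by
            simp only [pvBisLoop, if_pos hlt]
            rw [if_pos hcmp]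
          rw [step]
          refine (ih ((lo + hi) / 2 + 1) hi (by omega) hhn (by omega) ?_ hhigh).imp (by omega) (fun x => x)
          intro j hj hjlt
          exact le_trans (mono j ((lo + hi) / 2) (by omega) hmr) (hget ▸ hcmp)
        · have step : pvBisLoop los f (fuel + 1) lo hi = pvBisLoop los f fuel lo ((lo + hi) / 2) := by
            simp only [pvBisLoop, if_pos hlt]
            rw [if_neg hcmp]
          rw [step]
          refine (ih lo ((lo + hi) / 2) hm1 (by omega) (by omega) hlow ?_).imp (fun x => x)
            (fun h => ⟨by omega, h.2⟩)
          intro j hj hjm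
          exact lt_of_lt_of_le (hget ▸ (by omega : f < los.getD ((lo + hi) / 2) 0)) (mono ((lo + hi) / 2) j hjm hj)
      · have : pvBisLoop los f (fuel + 1) lo hi = lo := by simp only [pvBisLoop, if_neg hlt]
        rw [this]
        exact ⟨le_refl _, hlh, hlow, fun j hj hlj => hhigh j hj (by omega)⟩

-- on a lo-sorted, gap-separated interval list, membership = the bisection test
theorem covered_iff_bis (merged : List (Int × Int)) (f : Int)
    (hp : merged.Pairwise (fun a b => a.1 ≤ b.1))
    (hc : merged.IsChain (fun a b => a.2 < b.1)) :
    merged.any (pvIn f) =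
      !(decide (pvBisLoop (merged.map (fun iv => iv.1)) f merged.length 0 merged.length = 0) ||
        decide ((merged.getD (pvBisLoop (merged.map (fun iv => iv.1)) f merged.length 0 merged.length - 1) (0, 0)).2 < f)) := by
  have hlen : (merged.map (fun iv => iv.1)).length = merged.length := by simp
  have hlp : (merged.map (fun iv => iv.1)).Pairwise (· ≤ ·) := List.pairwise_map.mpr hp
  obtain ⟨h1, h2, h3, h4⟩ := bisLoop_spec (merged.map (fun iv => iv.1)) f hlp merged.length 0 merged.length
    (by omega) (by omega) (by omega) (fun j hj hij => absurd hij (by omega)) (fun j hj hij => absurd hij (by omega))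
  set i := pvBisLoop (merged.map (fun iv => iv.1)) f merged.length 0 merged.length with hidef
  by_cases hcov : merged.any (pvIn f) = true
  · rw [hcov]
    obtain ⟨iv, hmem, hiv⟩ := List.any_eq_true.mp hcov
    obtain ⟨j, hj, rfl⟩ := List.mem_iff_getElem.mp hmem
    have hivp : merged[j].1 ≤ f ∧ f ≤ merged[j].2 := by simpa [pvIn] using hiv
    have hjlt : j < i := by
      by_contra h
      have h5 : f < (merged.map (fun iv => iv.1))[j]'(by omega) := h4 j (by omega) (by omega)
      rw [List.getElem_map] at h5
      omega
    have hi0 : i ≠ 0 := by omega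
    have hji : j = i - 1 := by
      by_contra hne
      have hj1 : j + 1 < i := by omega
      have h5 : (merged.map (fun iv => iv.1))[j + 1]'(by omega) ≤ f := h3 (j + 1) (by omega) hj1
      rw [List.getElem_map] at h5
      have hchain : merged[j].2 < (merged[j + 1]'(by omega)).1 := hc.getElem j (by omega)
      omega
    have hgd : merged.getD (i - 1) (0, 0) = merged[j] := by
      rw [List.getD_eq_getElem merged (0, 0) (by omega)]
      congr 1
      omega
    have hv : ¬((merged.getD (i - 1) (0, 0)).2 < f) := by rw [hgd]; omega
    rw [decide_eq_false hi0, decide_eq_false hv, Bool.false_or, Bool.not_false]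
  · have hcf : merged.any (pvIn f) = false := by simpa using hcov
    rw [hcf]
    rcases Nat.eq_zero_or_pos i with hi0 | hi0
    · simp [hi0]
    · by_cases hv : (merged.getD (i - 1) (0, 0)).2 < f
      · rw [decide_eq_true hv, Bool.or_true, Bool.not_true]
      · exfalso
        have hlt : i - 1 < merged.length := by omega
        have h5 : (merged.map (fun iv => iv.1))[i - 1]'(by omega) ≤ f := h3 (i - 1) (by omega) (by omega)
        rw [List.getElem_map] at h5
        have hgd : merged.getD (i - 1) (0, 0) = merged[i - 1] := List.getD_eq_getElem merged (0, 0) hlt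
        rw [hgd] at hv
        have : pvIn f merged[i - 1] = true := by simp [pvIn]; omega
        have := List.any_eq_true.mpr ⟨merged[i - 1], List.getElem_mem hlt, this⟩
        rw [hcf] at this
        exact Bool.false_ne_true this

theorem ticket_loops_eq (vals : List (List (Int × Int))) (merged : List (Int × Int)) (ticket : List Int)
    (h : ∀ f, pvValidLoop vals f =
      !(decide (pvBisLoop (merged.map (fun iv => iv.1)) f merged.length 0 merged.length = 0) ||
        decide ((merged.getD (pvBisLoop (merged.map (fun iv => iv.1)) f merged.length 0 merged.length - 1) (0, 0)).2 < f))) :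
    pvTicketLoopA vals ticket = pvTicketLoopB merged (merged.map (fun iv => iv.1)) merged.length ticket := by
  induction ticket with
  | nil => rfl
  | cons f rest ih =>
      simp only [pvTicketLoopA, pvTicketLoopB]
      rw [h f]
      rcases Decidable.em (pvBisLoop (merged.map (fun iv => iv.1)) f merged.length 0 merged.length = 0 ∨
          (merged.getD (pvBisLoop (merged.map (fun iv => iv.1)) f merged.length 0 merged.length - 1) (0, 0)).2 < f) with hb | hb
      · rw [if_neg (by simp at hb ⊢; tauto), if_pos hb]
      · rw [if_pos (by simp at hb ⊢; tauto), if_neg hb, ih]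

-- ===== VERDICT (by name: the statement is the Claim_ definition above) =====
theorem find_invalid_field_spec : Claim_equal_find_invalid_field := by
  intro rules ticket _
  unfold Spec_find_invalid_field find_invalid_field find_invalid_field_alt
  have hsp : (PySem.List.sorted (((PySem.Dict.ofList rules).values).flatMap (fun rule => rule)) (fun iv => iv.1)).Pairwise
      (fun a b => a.1 ≤ b.1) := PySem.List.sorted_pairwise _ _
  obtain ⟨-, hpw, hch⟩ := merge_master 0
    (PySem.List.sorted (((PySem.Dict.ofList rules).values).flatMap (fun rule => rule)) (fun iv => iv.1)) []
    hsp (by simp) (by simp) (by simp)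
  show pvTicketLoopA ((PySem.Dict.ofList rules).values) ticket = pvTicketLoopB _ _ _ ticket
  have hlen : (((PySem.List.sorted (((PySem.Dict.ofList rules).values).flatMap (fun rule => rule)) (fun iv => iv.1)).foldl
      pvMergeStep []).reverse.map (fun iv => iv.1)).length =
      ((PySem.List.sorted (((PySem.Dict.ofList rules).values).flatMap (fun rule => rule)) (fun iv => iv.1)).foldl
      pvMergeStep []).reverse.length := by simp
  rw [hlen]
  apply ticket_loops_eq
  intro f
  rw [validLoop_eq_any]
  have hperm : (((PySem.Dict.ofList rules).values).flatMap (fun rule => rule)).any (pvIn f) =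
      (PySem.List.sorted (((PySem.Dict.ofList rules).values).flatMap (fun rule => rule)) (fun iv => iv.1)).any (pvIn f) :=
    (List.Perm.any_eq (PySem.List.sorted_perm _ _ _)).symm
  have hm := (merge_master f
    (PySem.List.sorted (((PySem.Dict.ofList rules).values).flatMap (fun rule => rule)) (fun iv => iv.1)) []
    hsp (by simp) (by simp) (by simp)).1
  simp only [List.any_nil, Bool.false_or] at hm
  rw [hperm, ← hm, ← List.any_reverse]
  exact covered_iff_bis _ f (List.pairwise_reverse.mpr hpw) (List.isChain_reverse.mpr hch)
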